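-- pv_equiv track=rewrite | github.com/lumiere2022/algorithm22 | tree-heap/pgm1.py | solution
-- ===== SOURCE A (Python) =====
-- import heapq
--
-- def solution(scoville, K):
--     answer = 0
--     heapq.heapify(scoville)
--
--     while scoville:
--         num1 = heapq.heappop(scoville)
--         if num1 < K:
--             if not scoville:
--                 return -1
--             num2 = heapq.heappop(scoville)
--             heapq.heappush(scoville, num1 + num2*2)
--             answer+=1
--         else:
--             return answer
-- ===== SOURCE B (Python) =====
-- def solution(scoville, K):
--     # Sort once, then repeatedly take the two smallest from the front and
--     # put the mix back into place with a hand-written binary insertion,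
--     # keeping the whole list totally ordered instead of heap-ordered.
--     xs = sorted(scoville)
--     answer = 0
--     while xs:
--         if xs[0] >= K:
--             return answer
--         if len(xs) == 1:
--             return -1
--         num1, num2 = xs[0], xs[1]
--         c = num1 + 2 * num2
--         xs = xs[2:]
--         lo, hi = 0, len(xs)
--         while lo < hi:
--             mid = (lo + hi) // 2
--             if xs[mid] < c:
--                 lo = mid + 1
--             else:
--                 hi = mid
--         xs.insert(lo, c)
--         answer += 1
--     return answer
-- ===== Notes on version B (the rewrite author's own statement) =====
-- stated objective: alternative
-- what changed: Replaces the binary min-heap with a single upfront sort plus a totally ordered list maintained by a hand-written binary-search insertion, checking the threshold before popping instead of after.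
-- outside the precondition, e.g. on solution([], 7): A returns None, B returns 0
import Mathlib
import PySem

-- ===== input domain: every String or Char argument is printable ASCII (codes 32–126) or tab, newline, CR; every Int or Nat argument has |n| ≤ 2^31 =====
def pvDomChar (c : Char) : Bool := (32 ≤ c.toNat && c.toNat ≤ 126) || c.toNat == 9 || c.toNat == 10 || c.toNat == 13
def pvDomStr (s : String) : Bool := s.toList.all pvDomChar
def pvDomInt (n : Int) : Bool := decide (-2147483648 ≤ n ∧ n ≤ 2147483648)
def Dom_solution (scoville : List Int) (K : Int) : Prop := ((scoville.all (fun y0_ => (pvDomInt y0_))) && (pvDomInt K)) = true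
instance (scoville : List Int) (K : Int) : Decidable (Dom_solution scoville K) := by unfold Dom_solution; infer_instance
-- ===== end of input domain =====

-- B replaces A's binary min-heap by one upfront sort plus a totally ordered list kept sorted
-- with a hand-written binary insertion (alternative decomposition, no speed claim); A mutates
-- `scoville` in place (heapify/pop/push), so the equivalence proved is about the RETURN value only.

-- ===== PORT A =====
-- A drives the `heapq` library; the library calls are ported by heapq's documented contract:
-- heappop removes and returns the smallest element, heappush adds one, heapify only reorders
-- in place.  For Int elements this contract (popped value + remaining multiset) determines
-- A's behaviour exactly, so the heap state is carried as the plain list of its elements: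
-- heapify is the identity on it, heappop is "scan for the minimum, remove one occurrence",
-- heappush appends.
def solutionGoA (h : List Int) (K ans : Int) : Int :=
  -- while scoville:
  match hm : PySem.List.min? h (fun x => x) with
  | none => ans                          -- loop falls through (Python returns None; only reached from the empty input, outside Pre_)
  | some num1 =>                         -- num1 = heapq.heappop(scoville)
    if num1 < K then
      match hm1 : PySem.List.min? (h.erase num1) (fun x => x) with
      | none => -1                       -- if not scoville: return -1
      | some num2 =>                     -- num2 = heapq.heappop(scoville)
        -- heapq.heappush(scoville, num1 + num2*2); answer += 1
        solutionGoA ((h.erase num1).erase num2 ++ [num1 + num2 * 2]) K (ans + 1)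
    else ans                             -- return answer
termination_by h.length
decreasing_by
  have h1 : num1 ∈ h := PySem.List.min?_mem hm
  have h2 : num2 ∈ h.erase num1 := PySem.List.min?_mem hm1
  have e1 : (h.erase num1).length = h.length - 1 := List.length_erase_of_mem h1
  have e2 : ((h.erase num1).erase num2).length = (h.erase num1).length - 1 :=
    List.length_erase_of_mem h2
  have hp : 0 < (h.erase num1).length := List.length_pos_of_mem h2
  simp only [List.length_append, List.length_cons, List.length_nil, e2, e1]
  omega

def solution (scoville : List Int) (K : Int) : Int :=
  solutionGoA scoville K 0               -- answer = 0; heapq.heapify(scoville)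

-- ===== PORT B =====
-- lo, hi = 0, len(xs); while lo < hi: ...   (xs[mid] is ported as getD mid 0; exact, since
-- 0 ≤ lo ≤ mid < hi ≤ len(xs) holds at every probe)
def bsLo (xs : List Int) (c : Int) (lo hi : Nat) : Nat :=
  if _h : lo < hi then
    let mid := (lo + hi) / 2
    if xs.getD mid 0 < c then bsLo xs c (mid + 1) hi
    else bsLo xs c lo mid
  else lo
termination_by hi - lo
decreasing_by all_goals omega

def solutionGoB (xs : List Int) (K ans : Int) : Int :=
  match xs with
  | [] => ans                            -- while xs: ... / final return answer
  | num1 :: t =>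
    if num1 ≥ K then ans                 -- if xs[0] >= K: return answer
    else match t with
      | [] => -1                         -- if len(xs) == 1: return -1
      | num2 :: rest =>                  -- num1, num2 = xs[0], xs[1]; xs = xs[2:]
        let c := num1 + 2 * num2
        let lo := bsLo rest c 0 rest.length
        solutionGoB (PySem.List.insert rest (lo : Int) c) K (ans + 1)   -- xs.insert(lo, c)
termination_by xs.length
decreasing_by simp [PySem.List.length_insert]

def solution_alt (scoville : List Int) (K : Int) : Int :=
  solutionGoB (PySem.List.sorted scoville (fun x => x) false) K 0   -- xs = sorted(scoville)

-- ===== PRECONDITION & SPEC =====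
-- Pre_ excludes only the empty list, on which the Python A falls off its while loop and
-- returns None (not an int); B returns 0 there.
def Pre_solution (scoville : List Int) (K : Int) : Prop := scoville ≠ []
instance (scoville : List Int) (K : Int) : Decidable (Pre_solution scoville K) := by
  unfold Pre_solution; infer_instance

def pvWitness_solution : List Int × Int := ([1, 2, 3, 9, 10, 12], 7)

def Spec_solution (scoville : List Int) (K : Int) (out : Int) : Prop := out = solution_alt scoville K
instance (scoville : List Int) (K : Int) (out : Int) : Decidable (Spec_solution scoville K out) := by
  unfold Spec_solution; infer_instance

-- ===== CLAIM (what is proved, stated in full; the proofs are below) =====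
def Claim_equal_solution : Prop := ∀ (scoville : List Int) (K : Int), Dom_solution scoville K → Pre_solution scoville K → Spec_solution scoville K (solution scoville K)

-- ===== LEMMAS AND PROOFS =====

-- PySem's Python insert at an in-range nonnegative position is Mathlib's insertIdx
theorem insert_eq_insertIdx (l : List Int) (r : Nat) (c : Int) (h : r ≤ l.length) :
    PySem.List.insert l (r : Int) c = l.insertIdx r c := by
  rw [PySem.List.insert_natCast l r c h]
  induction l generalizing r with
  | nil => simp at h; simp [h]
  | cons x t ih =>
    cases r with
    | zero => simp
    | succ n => simp [List.insertIdx_succ_cons, ih n (by simpa using h)]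

-- correctness of the hand-written binary search: on a sorted list it returns a position with
-- everything strictly below it < c and everything from it on ≥ c
theorem bsLo_correct (xs : List Int) (c : Int) (hs : xs.Pairwise (· ≤ ·)) :
    ∀ n lo hi, hi - lo ≤ n → lo ≤ hi → hi ≤ xs.length →
      (∀ j (hj : j < xs.length), j < lo → xs[j] < c) →
      (∀ j (hj : j < xs.length), hi ≤ j → c ≤ xs[j]) →
      bsLo xs c lo hi ≤ xs.length ∧
        (∀ j (hj : j < xs.length), j < bsLo xs c lo hi → xs[j] < c) ∧
        (∀ j (hj : j < xs.length), bsLo xs c lo hi ≤ j → c ≤ xs[j]) := by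
  intro n
  induction n with
  | zero =>
    intro lo hi hfuel hlohi hhi hlow hhigh
    rw [bsLo]
    simp only [show ¬ lo < hi by omega, dite_false]
    exact ⟨by omega, fun j hj hjlo => hlow j hj hjlo, fun j hj hjlo => hhigh j hj (by omega)⟩
  | succ n ih =>
    intro lo hi hfuel hlohi hhi hlow hhigh
    rw [bsLo]
    by_cases hlt : lo < hi
    · simp only [hlt, dite_true]
      have hmid : (lo + hi) / 2 < xs.length := by omega
      have hget : xs.getD ((lo + hi) / 2) 0 = xs[(lo + hi) / 2] := List.getD_eq_getElem xs 0 hmid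
      by_cases hc : xs.getD ((lo + hi) / 2) 0 < c
      · simp only [hc, ite_true]
        refine ih ((lo + hi) / 2 + 1) hi (by omega) (by omega) hhi ?_ hhigh
        intro j hj hjlo
        rw [hget] at hc
        rcases Nat.lt_or_ge j ((lo + hi) / 2) with h' | h'
        · exact lt_of_le_of_lt (List.pairwise_iff_getElem.mp hs j _ hj hmid h') hc
        · have hje : j = (lo + hi) / 2 := by omega
          subst hje; exact hc
      · simp only [hc, ite_false]
        refine ih lo ((lo + hi) / 2) (by omega) (by omega) (by omega) hlow ?_
        intro j hj hjlo
        rw [hget] at hc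
        rw [not_lt] at hc
        rcases Nat.lt_or_ge ((lo + hi) / 2) j with h' | h'
        · exact le_trans hc (List.pairwise_iff_getElem.mp hs _ j hmid hj h')
        · have hje : j = (lo + hi) / 2 := by omega
          subst hje; exact hc
    · simp only [hlt, dite_false]
      exact ⟨by omega, fun j hj hjlo => hlow j hj (by omega), fun j hj hjlo => hhigh j hj (by omega)⟩

-- the binary-search position keeps the list sorted after insertion
theorem pairwise_insertIdx_bsLo (rest : List Int) (c : Int) (hs : rest.Pairwise (· ≤ ·)) :
    (rest.insertIdx (bsLo rest c 0 rest.length) c).Pairwise (· ≤ ·) := by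
  obtain ⟨hle, hlt, hge⟩ := bsLo_correct rest c hs rest.length 0 rest.length
    (by omega) (by omega) le_rfl
    (fun j hj hjlo => absurd hjlo (by omega))
    (fun j hj hjlo => absurd hj (by omega))
  set lo := bsLo rest c 0 rest.length with hlo
  have hlen : (rest.insertIdx lo c).length = rest.length + 1 := by
    rw [List.length_insertIdx_of_le_length hle]
  rw [List.pairwise_iff_getElem]
  intro i j hi hj hij
  rw [List.getElem_insertIdx, List.getElem_insertIdx]
  rw [hlen] at hi hj
  split_ifs with h1 h2 h3 h4 h5 <;> try omega
  · -- i < lo, j < lo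
    exact List.pairwise_iff_getElem.mp hs i j (by omega) (by omega) hij
  · -- i < lo, j = lo : rest[i] ≤ c
    exact le_of_lt (hlt i (by omega) h1)
  · -- i < lo, j > lo : rest[i] < c ≤ rest[j-1]
    exact le_trans (le_of_lt (hlt i (by omega) h1)) (hge (j - 1) (by omega) (by omega))
  · -- i = lo, j > lo : c ≤ rest[j-1]
    exact hge (j - 1) (by omega) (by omega)
  · -- i > lo, j > lo
    exact List.pairwise_iff_getElem.mp hs (i - 1) (j - 1) (by omega) (by omega) (by omega)

-- the minimum scan on any permutation of a sorted nonempty list returns its head value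
theorem min?_of_perm_sorted {h : List Int} {m : Int} {t : List Int}
    (hp : h.Perm (m :: t)) (hs : (m :: t).Pairwise (· ≤ ·)) :
    PySem.List.min? h (fun x => x) = some m := by
  have hne : h ≠ [] := by
    intro he; subst he
    exact List.cons_ne_nil m t hp.nil_eq.symm
  cases hmin : PySem.List.min? h (fun x => x) with
  | none => exact absurd ((PySem.List.min?_eq_none_iff h _).mp hmin) hne
  | some m' =>
    have hm'mem : m' ∈ m :: t := hp.mem_iff.mp (PySem.List.min?_mem hmin)
    have hle1 : m' ≤ m := PySem.List.min?_isMin hmin m (hp.mem_iff.mpr (List.mem_cons_self))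
    have hle2 : m ≤ m' := by
      rcases List.mem_cons.mp hm'mem with he | hmem
      · omega
      · exact (List.pairwise_cons.mp hs).1 m' hmem
    have : m' = m := le_antisymm hle1 hle2
    rw [this]

-- one unfolding step of A's loop, once the minimum scan is known
theorem goA_step (h : List Int) (K ans num1 : Int)
    (hmin : PySem.List.min? h (fun x => x) = some num1) :
    solutionGoA h K ans =
      if num1 < K then
        match PySem.List.min? (h.erase num1) (fun x => x) with
        | none => -1
        | some num2 => solutionGoA ((h.erase num1).erase num2 ++ [num1 + num2 * 2]) K (ans + 1)
      else ans := by
  rw [solutionGoA.eq_def]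
  split
  · rename_i heq
    rw [hmin] at heq
    cases heq
  · rename_i num1' heq
    rw [hmin] at heq
    injection heq with heq'
    subst heq'
    by_cases hk : num1 < K
    · simp only [if_pos hk]
      split
      · rename_i heq2
        simp only [heq2]
      · rename_i num2 heq2
        simp only [heq2]
    · simp only [if_neg hk]

-- one unfolding step of B's loop on a singleton
theorem goB_one (num1 : Int) (K ans : Int) :
    solutionGoB [num1] K ans = if num1 ≥ K then ans else -1 := by
  rw [solutionGoB.eq_def]

-- one unfolding step of B's loop on a list of length ≥ 2
theorem goB_cons2 (num1 num2 : Int) (rest : List Int) (K ans : Int) :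
    solutionGoB (num1 :: num2 :: rest) K ans =
      if num1 ≥ K then ans
      else solutionGoB (PySem.List.insert rest
        ((bsLo rest (num1 + 2 * num2) 0 rest.length : Nat) : Int) (num1 + 2 * num2)) K (ans + 1) := by
  rw [solutionGoB.eq_def]

-- main loop equivalence: A's heap state and B's sorted list hold the same multiset
theorem go_eq (n : Nat) : ∀ (h xs : List Int) (K ans : Int), h.length ≤ n →
    h.Perm xs → xs.Pairwise (· ≤ ·) →
    solutionGoA h K ans = solutionGoB xs K ans := by
  induction n with
  | zero =>
    intro h xs K ans hlen hp _hs
    have hh : h = [] := List.eq_nil_of_length_eq_zero (by omega)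
    subst hh
    have hx : xs = [] := hp.nil_eq.symm ▸ rfl
    subst hx
    rw [solutionGoA, solutionGoB]
    simp [PySem.List.min?]
  | succ n ih =>
    intro h xs K ans hlen hp hs
    cases xs with
    | nil =>
      have hh : h = [] := hp.eq_nil
      subst hh
      rw [solutionGoA, solutionGoB]
      simp [PySem.List.min?]
    | cons num1 t =>
      have hmin : PySem.List.min? h (fun x => x) = some num1 := min?_of_perm_sorted hp hs
      have hperm1 : (h.erase num1).Perm t := by
        have := hp.erase num1
        rwa [List.erase_cons_head] at this
      rw [goA_step h K ans num1 hmin]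
      cases t with
      | nil =>
        rw [goB_one]
        have h1 : h.erase num1 = [] := hperm1.eq_nil
        rw [h1]
        simp only [show PySem.List.min? ([] : List Int) (fun x => x) = none from rfl]
        split_ifs <;> omega
      | cons num2 rest =>
        have hs1 : (num2 :: rest).Pairwise (· ≤ ·) := (List.pairwise_cons.mp hs).2
        have hmin1 : PySem.List.min? (h.erase num1) (fun x => x) = some num2 :=
          min?_of_perm_sorted hperm1 hs1
        simp only [hmin1]
        rw [goB_cons2]
        by_cases hk : num1 < K
        · simp only [if_pos hk, if_neg (show ¬ num1 ≥ K by omega)]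
          have hperm2 : ((h.erase num1).erase num2).Perm rest := by
            have := hperm1.erase num2
            rwa [List.erase_cons_head] at this
          have hsrest : rest.Pairwise (· ≤ ·) := (List.pairwise_cons.mp hs1).2
          obtain ⟨hle, _, _⟩ := bsLo_correct rest (num1 + 2 * num2) hsrest rest.length 0 rest.length
            (by omega) (by omega) le_rfl
            (fun j hj hjlo => absurd hjlo (by omega))
            (fun j hj hjlo => absurd hj (by omega))
          have hins : PySem.List.insert rest ((bsLo rest (num1 + 2 * num2) 0 rest.length : Nat) : Int)
              (num1 + 2 * num2) = rest.insertIdx (bsLo rest (num1 + 2 * num2) 0 rest.length)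
              (num1 + 2 * num2) := insert_eq_insertIdx rest _ _ hle
          rw [hins]
          apply ih
          · -- length bound
            have hmem1 : num1 ∈ h := PySem.List.min?_mem hmin
            have e1 : (h.erase num1).length = h.length - 1 := List.length_erase_of_mem hmem1
            have hmem2 : num2 ∈ h.erase num1 := PySem.List.min?_mem hmin1
            have e2 : ((h.erase num1).erase num2).length = (h.erase num1).length - 1 :=
              List.length_erase_of_mem hmem2
            have hp2 : 0 < (h.erase num1).length := List.length_pos_of_mem hmem2
            simp only [List.length_append, List.length_cons, List.length_nil, e2, e1]
            omega
          · -- permutation: both next states are rest ++ [num1 + 2*num2] up to permutation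
            have hval : num1 + num2 * 2 = num1 + 2 * num2 := by ring
            rw [hval]
            have hstep : ((h.erase num1).erase num2 ++ [num1 + 2 * num2]).Perm
                (rest ++ [num1 + 2 * num2]) := hperm2.append_right _
            have h1 : (rest ++ [num1 + 2 * num2]).Perm ((num1 + 2 * num2) :: rest) :=
              List.perm_append_singleton _ _
            have h2 : (rest.insertIdx (bsLo rest (num1 + 2 * num2) 0 rest.length)
                (num1 + 2 * num2)).Perm ((num1 + 2 * num2) :: rest) :=
              List.perm_insertIdx _ _ hle
            exact (hstep.trans h1).trans h2.symm
          · -- sortedness of the inserted list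
            exact pairwise_insertIdx_bsLo rest (num1 + 2 * num2) hsrest
        · simp only [if_neg hk, if_pos (show num1 ≥ K by omega)]

-- ===== VERDICT (by name: the statement is the Claim_ definition above) =====
theorem solution_spec : Claim_equal_solution := by
  intro scoville K _hdom _hpre
  unfold Spec_solution solution solution_alt
  exact go_eq scoville.length scoville _ K 0 le_rfl
    (PySem.List.sorted_perm scoville (fun x => x) false).symm
    (PySem.List.sorted_pairwise scoville (fun x => x))
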